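-- pv_equiv track=rewrite | github.com/Scoder08/sargam-ai | apps/backend/app/services/audio_analysis_service.py | _normalize_rhythm
-- ===== SOURCE A (Python) =====
-- def _normalize_rhythm(time_intervals: list[int]) -> list[str]:
--     """
--     Normalize time intervals to relative rhythm categories.
--     This makes rhythm matching independent of actual tempo.
--
--     Categories:
--     - 'S' (short): < 200ms
--     - 'M' (medium): 200-500ms
--     - 'L' (long): 500-1000ms
--     - 'X' (extra long): > 1000ms
--     """
--     if not time_intervals:
--         return []
--
--     rhythm = []
--     for interval in time_intervals:
--         if interval < 200:
--             rhythm.append('S')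
--         elif interval < 500:
--             rhythm.append('M')
--         elif interval < 1000:
--             rhythm.append('L')
--         else:
--             rhythm.append('X')
--
--     return rhythm
-- ===== SOURCE B (Python) =====
-- _THRESHOLDS = [200, 500, 1000]
-- _LABELS = "SMLX"
--
--
-- def _bisect_right(a: list[int], x: int) -> int:
--     """Index of the first element of sorted list a that is > x (binary search)."""
--     lo, hi = 0, len(a)
--     while lo < hi:
--         mid = (lo + hi) // 2
--         if x < a[mid]:
--             hi = mid
--         else:
--             lo = mid + 1
--     return lo
--
--
-- def _normalize_rhythm(time_intervals: list[int]) -> list[str]: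
--     # Table-driven: binary-search each interval into the threshold table.
--     return [_LABELS[_bisect_right(_THRESHOLDS, i)] for i in time_intervals]
-- ===== Notes on version B (the rewrite author's own statement) =====
-- stated objective: alternative
-- what changed: Replaced the if/elif branch cascade with a table-driven formulation: a hand-written binary search (bisect_right) into a sorted threshold list selects the label character for each interval.
import Mathlib
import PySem

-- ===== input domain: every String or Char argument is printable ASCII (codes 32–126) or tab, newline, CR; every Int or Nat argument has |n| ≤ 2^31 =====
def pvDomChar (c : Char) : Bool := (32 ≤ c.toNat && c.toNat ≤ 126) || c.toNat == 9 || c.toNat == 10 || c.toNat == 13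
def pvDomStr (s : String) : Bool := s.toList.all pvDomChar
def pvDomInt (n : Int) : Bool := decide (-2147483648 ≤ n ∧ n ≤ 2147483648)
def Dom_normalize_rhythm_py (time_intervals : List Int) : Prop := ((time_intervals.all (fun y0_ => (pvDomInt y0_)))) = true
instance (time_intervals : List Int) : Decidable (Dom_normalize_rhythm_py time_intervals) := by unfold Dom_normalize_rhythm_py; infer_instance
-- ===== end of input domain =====

-- B replaces A's if/elif cascade with a binary search (hand-written bisect_right) into a sorted threshold table; same cost, table-driven formulation.
-- ===== PORT A =====
-- Port of A: early return on empty list, then a loop appending one label per interval.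
def normalize_rhythm_py (time_intervals : List Int) : List String :=
  if time_intervals = [] then []
  else
    time_intervals.foldl
      (fun rhythm interval =>
        if interval < 200 then rhythm ++ ["S"]
        else if interval < 500 then rhythm ++ ["M"]
        else if interval < 1000 then rhythm ++ ["L"]
        else rhythm ++ ["X"]) []

-- ===== PORT B =====
def pvThresholds : List Int := [200, 500, 1000]
def pvLabels : List String := ["S", "M", "L", "X"]

-- Port of Source B's _bisect_right: binary-search loop; the fuel argument (= initial hi, enough
-- since hi-lo shrinks each step) only makes the while-loop total, the computation is Source B's.
def pvBisectGo (a : List Int) (x : Int) : Nat → Nat → Nat → Nat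
  | 0, lo, _ => lo
  | fuel + 1, lo, hi =>
    if lo < hi then
      if x < a.getD ((lo + hi) / 2) 0 then pvBisectGo a x fuel lo ((lo + hi) / 2)
      else pvBisectGo a x fuel ((lo + hi) / 2 + 1) hi
    else lo

def pvBisectRight (a : List Int) (x : Int) : Nat :=
  pvBisectGo a x a.length 0 a.length

def normalize_rhythm_py_alt (time_intervals : List Int) : List String :=
  time_intervals.map (fun i => pvLabels.getD (pvBisectRight pvThresholds i) "X")

-- ===== PRECONDITION & SPEC =====
def Spec_normalize_rhythm_py (time_intervals : List Int) (out : List String) : Prop := out = normalize_rhythm_py_alt time_intervals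
instance (time_intervals : List Int) (out : List String) : Decidable (Spec_normalize_rhythm_py time_intervals out) := by unfold Spec_normalize_rhythm_py; infer_instance

-- ===== CLAIM (what is proved, stated in full; the proofs are below) =====
def Claim_equal_normalize_rhythm_py : Prop := ∀ (time_intervals : List Int), Dom_normalize_rhythm_py time_intervals → Spec_normalize_rhythm_py time_intervals (normalize_rhythm_py time_intervals)

-- ===== LEMMAS AND PROOFS =====
-- Closed-form evaluation of the search over the concrete threshold table.
lemma pvBisect_eval (i : Int) :
    pvBisectRight pvThresholds i =
      if i < 500 then (if i < 200 then 0 else 1) else (if i < 1000 then 2 else 3) := by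
  by_cases h1 : i < 200 <;> by_cases h2 : i < 500 <;> by_cases h3 : i < 1000 <;>
    first | omega | simp [pvBisectRight, pvBisectGo, pvThresholds, h1, h2, h3]

-- Per-element agreement: the binary-searched label equals the cascade's label.
lemma pvElem_eq (i : Int) :
    (if i < 200 then "S" else if i < 500 then "M" else if i < 1000 then "L" else "X")
      = pvLabels.getD (pvBisectRight pvThresholds i) "X" := by
  rw [pvBisect_eval]
  by_cases h1 : i < 200 <;> by_cases h2 : i < 500 <;> by_cases h3 : i < 1000 <;>
    first | omega | simp [pvLabels, h1, h2, h3]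

theorem normalize_rhythm_py_spec : Claim_equal_normalize_rhythm_py := by
  intro time_intervals _
  unfold Spec_normalize_rhythm_py normalize_rhythm_py normalize_rhythm_py_alt
  by_cases h : time_intervals = []
  · simp [h]
  · simp only [h, if_false]
    have step : ∀ (interval : Int) (rhythm : List String),
        (if interval < 200 then rhythm ++ ["S"]
         else if interval < 500 then rhythm ++ ["M"]
         else if interval < 1000 then rhythm ++ ["L"]
         else rhythm ++ ["X"])
          = rhythm ++ [pvLabels.getD (pvBisectRight pvThresholds interval) "X"] := by
      intro interval rhythm
      rw [← pvElem_eq interval]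
      split_ifs <;> rfl
    calc time_intervals.foldl
          (fun rhythm interval =>
            if interval < 200 then rhythm ++ ["S"]
            else if interval < 500 then rhythm ++ ["M"]
            else if interval < 1000 then rhythm ++ ["L"]
            else rhythm ++ ["X"]) []
        = time_intervals.foldl (fun rhythm interval =>
            rhythm ++ [pvLabels.getD (pvBisectRight pvThresholds interval) "X"]) [] := by
          simp only [step]
      _ = _ := by
          simpa using PySem.List.foldl_append_singleton_eq_map
            (fun i => pvLabels.getD (pvBisectRight pvThresholds i) "X") time_intervals
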